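-- pv_equiv track=rewrite | github.com/FarabiAkash/Pyhton | If Else/Alt_Odd_Sum.py | alternate_odd
-- ===== SOURCE A (Python) =====
-- def alternate_odd (n) :
--     """
--      a function that takes in an integer and
--      finds out the sum of all the odd numbers between 1 and the given input integer.
--     """
--
--     sum_odd =0
--     flag =0
--     for i in range(1,n+1):
--         if(i%2 !=0) :
--             if (flag==0):
--                 sum_odd = sum_odd+i
--
--             if(flag==0):
--                 flag=1
--             elif(flag==1):
--                 flag=0
--     return sum_odd
-- ===== SOURCE B (Python) =====
-- def alternate_odd(n):
--     # closed form: the summed terms are 1, 5, 9, ... (numbers ≡ 1 mod 4 up to n);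
--     # with k such terms the sum is k*(2k-1)
--     k = (n + 3) // 4 if n >= 1 else 0
--     return k * (2 * k - 1)
-- ===== Notes on version B (the rewrite author's own statement) =====
-- stated objective: faster
-- what changed: Replaced the O(n) flag-toggling loop by a closed-form arithmetic-series formula: count k = (n+3)//4 of the terms 1,5,9,... and return k*(2k-1).
import Mathlib
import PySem

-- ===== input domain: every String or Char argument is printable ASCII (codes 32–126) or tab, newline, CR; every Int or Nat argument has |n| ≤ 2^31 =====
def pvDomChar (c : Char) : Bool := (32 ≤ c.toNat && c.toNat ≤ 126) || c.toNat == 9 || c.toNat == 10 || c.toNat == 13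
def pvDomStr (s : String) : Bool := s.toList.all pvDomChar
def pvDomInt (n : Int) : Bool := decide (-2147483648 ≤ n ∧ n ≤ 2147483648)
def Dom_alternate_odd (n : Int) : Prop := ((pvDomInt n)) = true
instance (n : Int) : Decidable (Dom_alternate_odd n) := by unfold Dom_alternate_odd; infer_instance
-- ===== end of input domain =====

-- B replaces A's O(n) flag-toggling loop by a closed-form formula (objective: faster, asymptotic).

-- ===== PORT A =====
-- one loop iteration of A: state (sum_odd, flag)
def alternateOddStep (st : Int × Int) (i : Int) : Int × Int :=
  if i % 2 ≠ 0 then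
    let s := if st.2 = 0 then st.1 + i else st.1
    let f := if st.2 = 0 then 1 else if st.2 = 1 then 0 else st.2
    (s, f)
  else st

def alternate_odd (n : Int) : Int :=
  ((PySem.List.pyRange 1 (n + 1) 1).foldl alternateOddStep (0, 0)).1

-- ===== PORT B =====
def alternate_odd_alt (n : Int) : Int :=
  let k : Int := if n ≥ 1 then PySem.Int.floordiv (n + 3) 4 else 0
  k * (2 * k - 1)

-- ===== PRECONDITION & SPEC =====
def Spec_alternate_odd (n : Int) (out : Int) : Prop := out = alternate_odd_alt n
instance (n : Int) (out : Int) : Decidable (Spec_alternate_odd n out) := by unfold Spec_alternate_odd; infer_instance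

-- ===== CLAIM (what is proved, stated in full; the proofs are below) =====
def Claim_equal_alternate_odd : Prop := ∀ (n : Int), Dom_alternate_odd n → Spec_alternate_odd n (alternate_odd n)

-- ===== LEMMAS AND PROOFS =====

-- loop invariant: after processing 1..m, sum = K(2K-1) with K = (m+3)/4 terms summed,
-- and flag = parity of the number of odd i ≤ m
theorem alternate_odd_loop (m : Nat) :
    (PySem.List.pyRange 1 ((m : Int) + 1) 1).foldl alternateOddStep (0, 0)
      = ((((m + 3) / 4 : Nat) : Int) * (2 * (((m + 3) / 4 : Nat) : Int) - 1),
         ((((m + 1) / 2) % 2 : Nat) : Int)) := by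
  induction m with
  | zero => simp [PySem.List.pyRange_one_eq_nil]
  | succ m ih =>
    have hsplit : PySem.List.pyRange 1 (((m + 1 : Nat) : Int) + 1) 1
        = PySem.List.pyRange 1 ((m : Int) + 1) 1 ++ [((m : Int) + 1)] := by
      push_cast
      rw [show (m : Int) + 1 + 1 = ((m : Int) + 1) + 1 from rfl,
        PySem.List.pyRange_one_succ_right (by omega)]
    rw [hsplit, List.foldl_append, ih]
    simp only [List.foldl_cons, List.foldl_nil, alternateOddStep]
    rcases Nat.even_or_odd m with he | ho
    · -- m even, so m+1 odd: the branch fires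
      obtain ⟨a, rfl⟩ := he
      rcases Nat.even_or_odd a with ⟨b, rfl⟩ | ⟨b, rfl⟩
      · -- flag = 0 : add the new term
        have hf : ((b + b) + (b + b) + 1) / 2 % 2 = 0 := by omega
        have h1 : ((b + b) + (b + b) + 3) / 4 = b := by omega
        have h2 : ((b + b) + (b + b) + 1 + 3) / 4 = b + 1 := by omega
        have h3 : ((b + b) + (b + b) + 1 + 1) / 2 % 2 = 1 := by omega
        rw [hf, h1, h2, h3]
        have hc : ¬ ((((b + b : Nat) : Int)) + 1) % 2 = 0 := by omega
        push_cast
        norm_num [hc]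
        rw [if_pos (by omega : ((b : Int) + ↑b + (↑b + ↑b) + 1) % 2 = 1), Prod.mk.injEq]
        exact ⟨by ring, rfl⟩
      · -- flag = 1 : skip the term, toggle flag back
        have hf : ((2 * b + 1) + (2 * b + 1) + 1) / 2 % 2 = 1 := by omega
        have h1 : ((2 * b + 1) + (2 * b + 1) + 3) / 4
            = ((2 * b + 1) + (2 * b + 1) + 1 + 3) / 4 := by omega
        have h3 : ((2 * b + 1) + (2 * b + 1) + 1 + 1) / 2 % 2 = 0 := by omega
        rw [hf, h1, h3]
        have hc : ¬ ((((2 * b + 1 + (2 * b + 1) : Nat) : Int)) + 1) % 2 = 0 := by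
          push_cast; omega
        norm_num [hc]
        omega
    · -- m odd, so m+1 even: state unchanged
      obtain ⟨a, rfl⟩ := ho
      have hmod : ¬ (((2 * a + 1 : Nat) : Int) + 1) % 2 ≠ 0 := by
        push_cast; omega
      rw [if_neg hmod]
      have h1 : ((2 * a + 1 + 3) / 4 : Nat) = ((2 * a + 1 + 1 + 3) / 4 : Nat) := by omega
      have h2 : ((2 * a + 1 + 1) / 2 % 2 : Nat) = ((2 * a + 1 + 1 + 1) / 2 % 2 : Nat) := by omega
      rw [h1, h2]

-- ===== VERDICT (by name: the statement is the Claim_ definition above) =====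
theorem alternate_odd_spec : Claim_equal_alternate_odd := by
  intro n _
  unfold Spec_alternate_odd alternate_odd alternate_odd_alt
  by_cases hn : n ≥ 1
  · obtain ⟨m, rfl⟩ : ∃ m : Nat, n = (m : Int) := ⟨n.toNat, by omega⟩
    rw [alternate_odd_loop m]
    simp only [if_pos hn]
    have : PySem.Int.floordiv ((m : Int) + 3) 4 = (((m + 3) / 4 : Nat) : Int) := by
      simp only [PySem.Int.floordiv]
      rw [Int.fdiv_eq_ediv_of_nonneg _ (by omega)]
      omega
    rw [this]
  · rw [if_neg hn]
    rw [show PySem.List.pyRange 1 (n + 1) 1 = [] from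
      PySem.List.pyRange_one_eq_nil (by omega)]
    norm_num
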